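-- pv_equiv track=rewrite | github.com/s1sun/TCR-BCR-analysis-and-result-visualization | immune_profiler_V1_6.py | scanindex
-- ===== SOURCE A (Python) =====
-- def findmatchedpos(seg, subs, fixpos):
--     """
--     Finds the position of a substring in a string, with some flexibility.
--
--     Parameters:
--     seg (str): The string to search within.
--     subs (str): The substring to search for.
--     fixpos (int): Position within the substring to keep fixed.
--
--     Returns:
--     int: The last position where the substring (or a variation) is found, or -1 if not found.
--     """
--     poslist = []
--     pos = seg.find(subs)
--     while pos >= 0:
--         poslist.append(pos)
--         pos = seg.find(subs, pos + 1)
--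
--     if not poslist:
--         # Generate variations of the substring
--         l_subs = len(subs)
--         atcg = ["A", "T", "C", "G"]
--         for count in range(l_subs):
--             if count != fixpos:
--                 for base in atcg:
--                     temp = subs[:count] + base + subs[count+1:]
--                     pos = seg.find(temp)
--                     while pos >= 0:
--                         if pos not in poslist:
--                             poslist.append(pos)
--                         pos = seg.find(temp, pos + 1)
--
--     poslist.sort()
--     return poslist[-1] if poslist else -1
--
-- def scanindex(mig1line, mig2line, asslines, p_thread):
--     """
--     Scans for the correct index in the assembly lines that matches with the migration lines.
--
--     Parameters:
--     mig1line (str): First migration line.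
--     mig2line (str): Second migration line.
--     asslines (list): List of assembly lines.
--     p_thread (int): Thread index or position.
--
--     Returns:
--     int: The position in assembly lines that matches with migration lines, or -1 if not found.
--     """
--     ass_pos = -1
--     m2line = mig2line.split('\n')[0][-16:]
--     m1line = mig1line.split('\n')[0][:16]
--
--     for i in range(1, len(asslines)):
--         assline = asslines[i].split('\t')[0]
--         pe = findmatchedpos(m2line, assline[-16:], -1)
--         ps = findmatchedpos(m1line, assline[:16], -1)
--         if pe >= 0 and ps >= 0:
--             ass_pos = i
--             break
--
--     return ass_pos
-- ===== SOURCE B (Python) =====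
-- def _bestpos(seg, subs):
--     """Best (highest) match position of subs in seg, allowing one substituted
--     ATCG base anywhere when no exact match exists; -1 if nothing matches."""
--     p = seg.rfind(subs)
--     if p >= 0:
--         return p
--     best = -1
--     for count in range(len(subs)):
--         for base in "ATCG":
--             best = max(best, seg.rfind(subs[:count] + base + subs[count+1:]))
--     return best
--
-- def scanindex(mig1line, mig2line, asslines, p_thread):
--     m2line = mig2line.split('\n')[0][-16:]
--     m1line = mig1line.split('\n')[0][:16]
--     for i, line in enumerate(asslines[1:], start=1):
--         assline = line.split('\t')[0]
--         if _bestpos(m2line, assline[-16:]) >= 0 and _bestpos(m1line, assline[:16]) >= 0: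
--             return i
--     return -1
-- ===== Notes on version B (the rewrite author's own statement) =====
-- stated objective: simpler
-- what changed: findmatchedpos's collect-every-occurrence-into-a-list/sort/take-last machinery is replaced by direct rfind calls (the last occurrence IS the maximum position): return seg.rfind(subs) when nonnegative, otherwise the running max of seg.rfind over the one-base variations; the scan itself walks enumerate(asslines[1:]) and returns early instead of indexing with a break flag.
import Mathlib
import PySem

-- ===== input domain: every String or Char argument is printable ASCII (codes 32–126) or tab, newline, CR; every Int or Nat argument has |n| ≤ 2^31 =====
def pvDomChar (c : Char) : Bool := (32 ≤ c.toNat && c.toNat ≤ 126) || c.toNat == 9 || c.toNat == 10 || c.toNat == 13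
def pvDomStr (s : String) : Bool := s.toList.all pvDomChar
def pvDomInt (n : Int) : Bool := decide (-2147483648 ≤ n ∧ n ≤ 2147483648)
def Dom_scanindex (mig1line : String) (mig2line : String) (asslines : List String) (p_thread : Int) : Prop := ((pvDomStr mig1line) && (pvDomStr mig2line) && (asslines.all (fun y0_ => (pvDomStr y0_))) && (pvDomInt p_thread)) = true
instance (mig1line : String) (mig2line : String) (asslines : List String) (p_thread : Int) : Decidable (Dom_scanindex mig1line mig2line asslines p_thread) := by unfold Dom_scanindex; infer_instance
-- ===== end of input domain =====

-- ===== PORT A =====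
-- B rewrites findmatchedpos: rfind replaces the collect-all-positions/sort/take-last machinery (simpler; same results).
-- first element of s.split(sep): split never returns [], so headD [] is exact
def pvSplitHead (s : List Char) (sep : Char) : List Char := (PySem.Chars.splitOn s [sep]).headD []

-- 'pos = seg.find(subs); while pos >= 0: poslist.append(pos); pos = seg.find(subs, pos+1)'
-- (fuel seg.length+2 only makes the recursion total; the loop runs at most seg.length+1 times)
def pvFindAll (seg subs : List Char) : Nat → Int → List Int → List Int
  | 0, _, acc => acc
  | fuel+1, pos, acc =>
    if 0 ≤ pos then pvFindAll seg subs fuel (PySem.Chars.findFrom seg subs (pos+1)) (acc ++ [pos])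
    else acc

-- same loop with the 'if pos not in poslist' dedup of the variation branch
def pvVarLoop (seg temp : List Char) : Nat → Int → List Int → List Int
  | 0, _, acc => acc
  | fuel+1, pos, acc =>
    if 0 ≤ pos then
      pvVarLoop seg temp fuel (PySem.Chars.findFrom seg temp (pos+1))
        (if pos ∈ acc then acc else acc ++ [pos])
    else acc

def pvAtcg : List Char := ['A', 'T', 'C', 'G']

def findmatchedpos (seg subs : List Char) (fixpos : Int) : Int :=
  let poslist := pvFindAll seg subs (seg.length + 2) (PySem.Chars.find seg subs) []
  let poslist :=
    if poslist = [] then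
      (PySem.List.pyRange 0 (subs.length : Int) 1).foldl (fun pl count =>
        if count ≠ fixpos then
          pvAtcg.foldl (fun pl base =>
            let temp := PySem.List.slice subs none (some count) ++ [base] ++
                        PySem.List.slice subs (some (count + 1)) none
            pvVarLoop seg temp (seg.length + 2) (PySem.Chars.find seg temp) pl) pl
        else pl) []
    else poslist
  match PySem.List.pyGet? (PySem.List.sorted poslist id) (-1) with
  | some v => v
  | none => -1

def pvScanA (m1 m2 : List Char) (asslines : List String) : List Int → Int
  | [] => -1
  | i :: rest =>
    let assline := pvSplitHead (PySem.List.pyGetD asslines i "").toList '\t'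
    let pe := findmatchedpos m2 (PySem.List.slice assline (some (-16)) none) (-1)
    let ps := findmatchedpos m1 (PySem.List.slice assline none (some 16)) (-1)
    if 0 ≤ pe ∧ 0 ≤ ps then i else pvScanA m1 m2 asslines rest

def scanindex (mig1line : String) (mig2line : String) (asslines : List String) (p_thread : Int) : Int :=
  let m2line := PySem.List.slice (pvSplitHead mig2line.toList '\n') (some (-16)) none
  let m1line := PySem.List.slice (pvSplitHead mig1line.toList '\n') none (some 16)
  pvScanA m1line m2line asslines (PySem.List.pyRange 1 (asslines.length : Int) 1)

-- ===== PORT B =====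
def pvBestpos (seg subs : List Char) : Int :=
  let p := PySem.Chars.rfind seg subs
  if 0 ≤ p then p
  else
    (List.range subs.length).foldl (fun best count =>
      (String.toList "ATCG").foldl (fun b base =>
        max b (PySem.Chars.rfind seg (subs.take count ++ [base] ++ subs.drop (count + 1)))) best) (-1)

def pvScanB (m1 m2 : List Char) : Nat → List String → Int
  | _, [] => -1
  | i, line :: rest =>
    let assline := (PySem.Chars.splitOn line.toList ['\t']).headD []
    if 0 ≤ pvBestpos m2 (PySem.List.slice assline (some (-16)) none) ∧
       0 ≤ pvBestpos m1 (PySem.List.slice assline none (some 16)) then (i : Int)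
    else pvScanB m1 m2 (i + 1) rest

def scanindex_alt (mig1line : String) (mig2line : String) (asslines : List String) (p_thread : Int) : Int :=
  let m2line := PySem.List.slice ((PySem.Chars.splitOn mig2line.toList ['\n']).headD []) (some (-16)) none
  let m1line := PySem.List.slice ((PySem.Chars.splitOn mig1line.toList ['\n']).headD []) none (some 16)
  pvScanB m1line m2line 1 (asslines.drop 1)

-- ===== PRECONDITION & SPEC =====
def Spec_scanindex (mig1line : String) (mig2line : String) (asslines : List String) (p_thread : Int) (out : Int) : Prop := out = scanindex_alt mig1line mig2line asslines p_thread
instance (mig1line : String) (mig2line : String) (asslines : List String) (p_thread : Int) (out : Int) : Decidable (Spec_scanindex mig1line mig2line asslines p_thread out) := by unfold Spec_scanindex; infer_instance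

-- ===== CLAIM (what is proved, stated in full; the proofs are below) =====
def Claim_equal_scanindex : Prop := ∀ (mig1line : String) (mig2line : String) (asslines : List String) (p_thread : Int), Dom_scanindex mig1line mig2line asslines p_thread → Spec_scanindex mig1line mig2line asslines p_thread (scanindex mig1line mig2line asslines p_thread)

-- ===== LEMMAS AND PROOFS =====
-- occurrence of sub in s at index i
def pvOcc (s sub : List Char) (i : Nat) : Prop := i ≤ s.length ∧ sub <+: s.drop i

theorem pv_rfind_go_cases (s sub : List Char) (j : Nat) :
    PySem.Chars.rfind.go s sub j = -1 ∨
      ∃ i : Nat, PySem.Chars.rfind.go s sub j = (i : Int) ∧ i ≤ j ∧ sub <+: s.drop i := by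
  induction j with
  | zero =>
    rw [PySem.Chars.rfind.go]
    split_ifs with h
    · exact Or.inr ⟨0, by simp, by simpa [List.isPrefixOf_iff_prefix] using h⟩
    · exact Or.inl rfl
  | succ j ih =>
    rw [PySem.Chars.rfind.go]
    split_ifs with h
    · exact Or.inr ⟨j+1, by push_cast; ring, le_refl _, by simpa [List.isPrefixOf_iff_prefix] using h⟩
    · rcases ih with h1 | ⟨i, h1, h2, h3⟩
      · exact Or.inl h1
      · exact Or.inr ⟨i, h1, Nat.le_succ_of_le h2, h3⟩

theorem pv_rfind_go_ge (s sub : List Char) (j : Nat) : ∀ i : Nat, i ≤ j → sub <+: s.drop i →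
    (i : Int) ≤ PySem.Chars.rfind.go s sub j := by
  induction j with
  | zero =>
    intro i hij h
    interval_cases i
    rw [PySem.Chars.rfind.go]
    simp only [List.isPrefixOf_iff_prefix]
    rw [if_pos (by simpa using h)]
    simp
  | succ j ih =>
    intro i hij h
    rw [PySem.Chars.rfind.go]
    split_ifs with hp
    · push_cast; omega
    · rcases Nat.lt_or_ge i (j+1) with hi | hi
      · exact ih i (by omega) h
      · exfalso; apply hp
        have : i = j+1 := by omega
        subst this
        simpa [List.isPrefixOf_iff_prefix] using h


theorem pv_findFrom_le_len (s sub : List Char) (k : Nat) :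
    PySem.Chars.findFrom s sub (k : Int) ≤ (s.length : Int) := by
  simp only [PySem.Chars.findFrom]
  rw [if_neg (show ¬ ((k:Int) < 0) by omega)]
  split_ifs with h2 h3
  · omega
  · omega
  · have h1 := PySem.Chars.find_le_length (List.drop ((k:Int)).toNat (List.take ((s.length:Int)).toNat s)) sub
    have h4 : (List.drop ((k:Int)).toNat (List.take ((s.length:Int)).toNat s)).length = s.length - k := by
      simp
    rw [h4] at h1
    omega

theorem pv_findFrom_past (s sub : List Char) (k : Nat) (hk : s.length < k) :
    PySem.Chars.findFrom s sub (k : Int) = -1 := by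
  simp only [PySem.Chars.findFrom]
  rw [if_neg (show ¬ ((k:Int) < 0) by omega)]
  rw [if_pos (show (s.length : Int) < (k:Int) by omega)]

theorem pv_occ_infix {s sub : List Char} {k i : Nat} (hk : k ≤ i) (h : sub <+: s.drop i) :
    sub <:+: s.drop k := by
  have h2 : s.drop i = (s.drop k).drop (i - k) := by
    rw [List.drop_drop]; congr 1; omega
  rw [h2] at h
  exact h.isInfix.trans (List.drop_suffix _ _).isInfix

theorem pv_findAll_spec (seg subs : List Char) : ∀ (fuel k : Nat),
    seg.length + 1 - k ≤ fuel → ∀ acc,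
    ∃ ps, pvFindAll seg subs fuel (PySem.Chars.findFrom seg subs (k : Int)) acc = acc ++ ps ∧
      (∀ x ∈ ps, ∃ i : Nat, x = (i : Int) ∧ k ≤ i ∧ pvOcc seg subs i) ∧
      (∀ i : Nat, k ≤ i → pvOcc seg subs i → (i : Int) ∈ ps) := by
  intro fuel
  induction fuel with
  | zero =>
    intro k hk acc
    refine ⟨[], by simp [pvFindAll], by simp, ?_⟩
    intro i hki ⟨hlen, _⟩
    omega
  | succ fuel ih =>
    intro k hk acc
    by_cases hklen : seg.length < k
    · rw [pv_findFrom_past seg subs k hklen]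
      refine ⟨[], by simp [pvFindAll], by simp, ?_⟩
      intro i hki ⟨hlen, _⟩
      omega
    · push_neg at hklen
      by_cases hp : PySem.Chars.findFrom seg subs (k : Int) = -1
      · rw [hp]
        refine ⟨[], by simp [pvFindAll], by simp, ?_⟩
        intro i hki ⟨hlen, hpre⟩
        exact absurd (pv_occ_infix hki hpre)
          ((PySem.Chars.findFrom_natCast_eq_neg_one_iff seg subs k hklen).mp hp)
      · obtain ⟨hge, hpre, hmin⟩ := PySem.Chars.findFrom_natCast_spec seg subs k hklen hp
        set p := PySem.Chars.findFrom seg subs (k : Int) with hpdef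
        have hple : p ≤ (seg.length : Int) := pv_findFrom_le_len seg subs k
        have hp0 : 0 ≤ p := le_trans (by omega) hge
        have hpn : p = ((p.toNat : Nat) : Int) := by omega
        have hstep : pvFindAll seg subs (fuel+1) p acc
            = pvFindAll seg subs fuel (PySem.Chars.findFrom seg subs (((p.toNat + 1 : Nat) : Int))) (acc ++ [p]) := by
          simp only [pvFindAll, if_pos hp0]
          congr 2
          omega
        obtain ⟨ps', heq, hmem, hall⟩ := ih (p.toNat + 1) (by omega) (acc ++ [p])
        refine ⟨p :: ps', ?_, ?_, ?_⟩
        · rw [hstep, heq]; simp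
        · intro x hx
          rcases List.mem_cons.mp hx with hxe | hx
          · exact ⟨p.toNat, by omega, by omega, by omega, hxe ▸ hpre⟩
          · obtain ⟨i, h1, h2, h3⟩ := hmem x hx
            exact ⟨i, h1, by omega, h3⟩
        · intro i hki ⟨hlen, hipre⟩
          rcases Nat.lt_or_ge i (p.toNat + 1) with hi | hi
          · have : ¬ i < p.toNat := fun hlt => hmin i hki hlt hipre
            have : i = p.toNat := by omega
            subst this
            simp [hpn.symm]
          · exact List.mem_cons_of_mem _ (hall i hi ⟨hlen, hipre⟩)


theorem pv_varLoop_spec (seg temp : List Char) : ∀ (fuel k : Nat),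
    seg.length + 1 - k ≤ fuel → ∀ acc,
    ∃ ps, pvVarLoop seg temp fuel (PySem.Chars.findFrom seg temp (k : Int)) acc = acc ++ ps ∧
      (∀ x ∈ ps, ∃ i : Nat, x = (i : Int) ∧ k ≤ i ∧ pvOcc seg temp i) ∧
      (∀ i : Nat, k ≤ i → pvOcc seg temp i → (i : Int) ∈ acc ++ ps) := by
  intro fuel
  induction fuel with
  | zero =>
    intro k hk acc
    refine ⟨[], by simp [pvVarLoop], by simp, ?_⟩
    intro i hki ⟨hlen, _⟩
    omega
  | succ fuel ih =>
    intro k hk acc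
    by_cases hklen : seg.length < k
    · rw [pv_findFrom_past seg temp k hklen]
      refine ⟨[], by simp [pvVarLoop], by simp, ?_⟩
      intro i hki ⟨hlen, _⟩
      omega
    · push_neg at hklen
      by_cases hp : PySem.Chars.findFrom seg temp (k : Int) = -1
      · rw [hp]
        refine ⟨[], by simp [pvVarLoop], by simp, ?_⟩
        intro i hki ⟨hlen, hpre⟩
        exact absurd (pv_occ_infix hki hpre)
          ((PySem.Chars.findFrom_natCast_eq_neg_one_iff seg temp k hklen).mp hp)
      · obtain ⟨hge, hpre, hmin⟩ := PySem.Chars.findFrom_natCast_spec seg temp k hklen hp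
        set p := PySem.Chars.findFrom seg temp (k : Int) with hpdef
        have hple : p ≤ (seg.length : Int) := pv_findFrom_le_len seg temp k
        have hp0 : 0 ≤ p := le_trans (by omega) hge
        have hpn : p = ((p.toNat : Nat) : Int) := by omega
        set acc' := if p ∈ acc then acc else acc ++ [p] with hacc'
        have hstep : pvVarLoop seg temp (fuel+1) p acc
            = pvVarLoop seg temp fuel (PySem.Chars.findFrom seg temp (((p.toNat + 1 : Nat) : Int))) acc' := by
          simp only [pvVarLoop, if_pos hp0, hacc']
          congr 2
          omega
        obtain ⟨ps', heq, hmem, hall⟩ := ih (p.toNat + 1) (by omega) acc'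
        by_cases hin : p ∈ acc
        · rw [if_pos hin] at hacc'
          refine ⟨ps', by rw [hstep, heq, hacc'], ?_, ?_⟩
          · intro x hx
            obtain ⟨i, h1, h2, h3⟩ := hmem x hx
            exact ⟨i, h1, by omega, h3⟩
          · intro i hki ⟨hlen, hipre⟩
            rcases Nat.lt_or_ge i (p.toNat + 1) with hi | hi
            · have : ¬ i < p.toNat := fun hlt => hmin i hki hlt hipre
              have : i = p.toNat := by omega
              subst this
              exact List.mem_append_left _ (hpn ▸ hin)
            · have := hall i hi ⟨hlen, hipre⟩
              rw [hacc'] at this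
              exact this
        · rw [if_neg hin] at hacc'
          refine ⟨p :: ps', ?_, ?_, ?_⟩
          · rw [hstep, heq, hacc']; simp
          · intro x hx
            rcases List.mem_cons.mp hx with hxe | hx
            · exact ⟨p.toNat, by omega, by omega, by omega, hxe ▸ hpre⟩
            · obtain ⟨i, h1, h2, h3⟩ := hmem x hx
              exact ⟨i, h1, by omega, h3⟩
          · intro i hki ⟨hlen, hipre⟩
            rcases Nat.lt_or_ge i (p.toNat + 1) with hi | hi
            · have : ¬ i < p.toNat := fun hlt => hmin i hki hlt hipre
              have : i = p.toNat := by omega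
              subst this
              rw [← hpn]
              simp
            · have := hall i hi ⟨hlen, hipre⟩
              rw [hacc'] at this
              simp at this ⊢
              tauto

theorem pv_sorted_last_max (l : List Int) (hl : l ≠ []) :
    ∃ v, PySem.List.pyGet? (PySem.List.sorted l id) (-1) = some v ∧ v ∈ l ∧ ∀ x ∈ l, x ≤ v := by
  set sl := PySem.List.sorted l id with hsl
  have hperm : sl.Perm l := PySem.List.sorted_perm l id false
  have hne : sl ≠ [] := by
    intro h
    exact hl (List.Perm.eq_nil ((h ▸ hperm).symm))
  have hlen : 0 < sl.length := List.length_pos_iff.mpr hne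
  have hpair := PySem.List.sorted_pairwise l (id : Int → Int)
  rw [← hsl, List.pairwise_iff_getElem] at hpair
  refine ⟨sl[sl.length - 1], ?_, ?_, ?_⟩
  · have h1 : 1 ≤ sl.length := hlen
    simp [PySem.List.pyGet?, PySem.List.pyIdx?, h1]
  · exact hperm.subset (List.getElem_mem _)
  · intro x hx
    obtain ⟨i, hi, hxe⟩ := List.getElem_of_mem (hperm.symm.subset hx)
    rcases Nat.lt_or_ge i (sl.length - 1) with h | h
    · have h2 := hpair i (sl.length - 1) hi (by omega) h
      simp only [id] at h2
      rw [← hxe]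
      exact h2
    · have : i = sl.length - 1 := by omega
      subst this
      rw [← hxe]

theorem pv_rfind_cases (s sub : List Char) :
    PySem.Chars.rfind s sub = -1 ∨ ∃ i : Nat, PySem.Chars.rfind s sub = (i : Int) ∧ pvOcc s sub i := by
  rcases pv_rfind_go_cases s sub s.length with h | ⟨i, h1, h2, h3⟩
  · exact Or.inl h
  · exact Or.inr ⟨i, h1, h2, h3⟩

theorem pv_rfind_ge (s sub : List Char) (i : Nat) (h : pvOcc s sub i) :
    (i : Int) ≤ PySem.Chars.rfind s sub :=
  pv_rfind_go_ge s sub s.length i h.1 h.2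

theorem pv_find_zero (seg subs : List Char) :
    PySem.Chars.find seg subs = PySem.Chars.findFrom seg subs ((0 : Nat) : Int) := by
  simpa using (PySem.Chars.findFrom_zero seg subs).symm

theorem pv_findAllCall_spec (seg subs : List Char) (acc : List Int) :
    ∃ ps, pvFindAll seg subs (seg.length + 2) (PySem.Chars.find seg subs) acc = acc ++ ps ∧
      (∀ x ∈ ps, ∃ i : Nat, x = (i : Int) ∧ pvOcc seg subs i) ∧
      (∀ i : Nat, pvOcc seg subs i → (i : Int) ∈ ps) := by
  rw [pv_find_zero]
  obtain ⟨ps, h1, h2, h3⟩ := pv_findAll_spec seg subs (seg.length + 2) 0 (by omega) acc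
  exact ⟨ps, h1, fun x hx => (h2 x hx).imp (fun i ⟨a, _, c⟩ => ⟨a, c⟩),
    fun i h => h3 i (Nat.zero_le i) h⟩

theorem pv_varCall_spec (seg temp : List Char) (acc : List Int) :
    ∃ ps, pvVarLoop seg temp (seg.length + 2) (PySem.Chars.find seg temp) acc = acc ++ ps ∧
      (∀ x ∈ ps, ∃ i : Nat, x = (i : Int) ∧ pvOcc seg temp i) ∧
      (∀ i : Nat, pvOcc seg temp i → (i : Int) ∈ acc ++ ps) := by
  rw [pv_find_zero]
  obtain ⟨ps, h1, h2, h3⟩ := pv_varLoop_spec seg temp (seg.length + 2) 0 (by omega) acc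
  exact ⟨ps, h1, fun x hx => (h2 x hx).imp (fun i ⟨a, _, c⟩ => ⟨a, c⟩),
    fun i h => h3 i (Nat.zero_le i) h⟩

theorem pv_temp_eq (subs : List Char) (c : Nat) (base : Char) :
    PySem.List.slice subs none (some ((c : Nat) : Int)) ++ [base] ++
      PySem.List.slice subs (some (((c : Nat) : Int) + 1)) none
    = subs.take c ++ [base] ++ subs.drop (c + 1) := by
  rw [PySem.List.slice_to_natCast]
  rw [show ((c : Nat) : Int) + 1 = (((c + 1 : Nat)) : Int) by push_cast; ring]
  rw [PySem.List.slice_from_natCast]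

theorem pv_baseFold_spec (seg subs : List Char) (c : Nat) : ∀ (bs : List Char) (acc : List Int),
    ∃ ps, bs.foldl (fun pl base =>
        pvVarLoop seg (PySem.List.slice subs none (some ((c : Nat) : Int)) ++ [base] ++
            PySem.List.slice subs (some (((c : Nat) : Int) + 1)) none) (seg.length + 2)
          (PySem.Chars.find seg (PySem.List.slice subs none (some ((c : Nat) : Int)) ++ [base] ++
            PySem.List.slice subs (some (((c : Nat) : Int) + 1)) none)) pl) acc = acc ++ ps ∧
      (∀ x ∈ ps, ∃ b ∈ bs, ∃ i : Nat, x = (i : Int) ∧ pvOcc seg (subs.take c ++ [b] ++ subs.drop (c + 1)) i) ∧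
      (∀ b ∈ bs, ∀ i : Nat, pvOcc seg (subs.take c ++ [b] ++ subs.drop (c + 1)) i → (i : Int) ∈ acc ++ ps) := by
  intro bs
  induction bs with
  | nil => intro acc; exact ⟨[], by simp, by simp, by simp⟩
  | cons b bs ih =>
    intro acc
    obtain ⟨ps1, h1, h2, h3⟩ := pv_varCall_spec seg
      (PySem.List.slice subs none (some ((c : Nat) : Int)) ++ [b] ++
        PySem.List.slice subs (some (((c : Nat) : Int) + 1)) none) acc
    obtain ⟨ps2, g1, g2, g3⟩ := ih (acc ++ ps1)
    rw [pv_temp_eq] at h2 h3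
    refine ⟨ps1 ++ ps2, ?_, ?_, ?_⟩
    · rw [List.foldl_cons, h1, g1, List.append_assoc]
    · intro x hx
      rcases List.mem_append.mp hx with hx | hx
      · obtain ⟨i, hi1, hi2⟩ := h2 x hx
        exact ⟨b, List.mem_cons_self, i, hi1, hi2⟩
      · obtain ⟨b', hb', i, hi1, hi2⟩ := g2 x hx
        exact ⟨b', List.mem_cons_of_mem _ hb', i, hi1, hi2⟩
    · intro b0 hb0 i hocc
      rcases List.mem_cons.mp hb0 with hb0 | hb0
      · subst hb0
        have := h3 i hocc
        rw [← List.append_assoc]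
        exact List.mem_append_left _ this
      · rw [← List.append_assoc]
        exact g3 b0 hb0 i hocc

theorem pv_cntFold_spec (seg subs : List Char) : ∀ (cs : List Nat) (acc : List Int),
    ∃ ps, cs.foldl (fun pl c =>
        if ((c : Nat) : Int) ≠ (-1 : Int) then
          pvAtcg.foldl (fun pl base =>
            pvVarLoop seg (PySem.List.slice subs none (some ((c : Nat) : Int)) ++ [base] ++
                PySem.List.slice subs (some (((c : Nat) : Int) + 1)) none) (seg.length + 2)
              (PySem.Chars.find seg (PySem.List.slice subs none (some ((c : Nat) : Int)) ++ [base] ++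
                PySem.List.slice subs (some (((c : Nat) : Int) + 1)) none)) pl) pl
        else pl) acc = acc ++ ps ∧
      (∀ x ∈ ps, ∃ c ∈ cs, ∃ b ∈ pvAtcg, ∃ i : Nat, x = (i : Int) ∧ pvOcc seg (subs.take c ++ [b] ++ subs.drop (c + 1)) i) ∧
      (∀ c ∈ cs, ∀ b ∈ pvAtcg, ∀ i : Nat, pvOcc seg (subs.take c ++ [b] ++ subs.drop (c + 1)) i → (i : Int) ∈ acc ++ ps) := by
  intro cs
  induction cs with
  | nil => intro acc; exact ⟨[], by simp, by simp, by simp⟩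
  | cons c cs ih =>
    intro acc
    obtain ⟨ps1, h1, h2, h3⟩ := pv_baseFold_spec seg subs c pvAtcg acc
    obtain ⟨ps2, g1, g2, g3⟩ := ih (acc ++ ps1)
    refine ⟨ps1 ++ ps2, ?_, ?_, ?_⟩
    · rw [List.foldl_cons, if_pos (by omega : ((c : Nat) : Int) ≠ (-1 : Int)), h1, g1, List.append_assoc]
    · intro x hx
      rcases List.mem_append.mp hx with hx | hx
      · obtain ⟨b, hb, i, hi1, hi2⟩ := h2 x hx
        exact ⟨c, List.mem_cons_self, b, hb, i, hi1, hi2⟩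
      · obtain ⟨c', hc', b, hb, i, hi1, hi2⟩ := g2 x hx
        exact ⟨c', List.mem_cons_of_mem _ hc', b, hb, i, hi1, hi2⟩
    · intro c0 hc0 b hb i hocc
      rcases List.mem_cons.mp hc0 with hc0 | hc0
      · subst hc0
        have := h3 b hb i hocc
        rw [← List.append_assoc]
        exact List.mem_append_left _ this
      · rw [← List.append_assoc]
        exact g3 c0 hc0 b hb i hocc

theorem pv_maxFold_spec (g : Char → Int) (bs : List Char) (init : Int) :
    init ≤ bs.foldl (fun b x => max b (g x)) init ∧
      (∀ b ∈ bs, g b ≤ bs.foldl (fun b x => max b (g x)) init) ∧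
      (bs.foldl (fun b x => max b (g x)) init = init ∨
        ∃ b ∈ bs, bs.foldl (fun b x => max b (g x)) init = g b) := by
  obtain ⟨h1, h2⟩ := PySem.List.le_foldl_max_int bs g init
  refine ⟨h1, h2, ?_⟩
  have he : bs.foldl (fun b x => max b (g x)) init = (bs.map g).foldl max init := by
    rw [List.foldl_map]
  rw [he]
  rcases PySem.List.foldl_max_mem (bs.map g) init with h | h
  · exact Or.inl h
  · obtain ⟨b, hb, hbe⟩ := List.mem_map.mp h
    exact Or.inr ⟨b, hb, hbe.symm⟩

theorem pv_nestedMax_spec (f : Nat → Char → Int) (bs : List Char) : ∀ (cs : List Nat) (init : Int),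
    init ≤ cs.foldl (fun best c => bs.foldl (fun b x => max b (f c x)) best) init ∧
      (∀ c ∈ cs, ∀ b ∈ bs, f c b ≤ cs.foldl (fun best c => bs.foldl (fun b x => max b (f c x)) best) init) ∧
      (cs.foldl (fun best c => bs.foldl (fun b x => max b (f c x)) best) init = init ∨
        ∃ c ∈ cs, ∃ b ∈ bs, cs.foldl (fun best c => bs.foldl (fun b x => max b (f c x)) best) init = f c b) := by
  intro cs
  induction cs with
  | nil => intro init; exact ⟨le_refl _, by simp, Or.inl rfl⟩
  | cons c cs ih =>
    intro init
    obtain ⟨m1, m2, m3⟩ := pv_maxFold_spec (f c) bs init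
    obtain ⟨i1, i2, i3⟩ := ih (bs.foldl (fun b x => max b (f c x)) init)
    rw [List.foldl_cons]
    refine ⟨le_trans m1 i1, ?_, ?_⟩
    · intro c0 hc0 b hb
      rcases List.mem_cons.mp hc0 with hc0 | hc0
      · subst hc0; exact le_trans (m2 b hb) i1
      · exact i2 c0 hc0 b hb
    · rcases i3 with h | ⟨c', hc', b, hb, he⟩
      · rcases m3 with h2 | ⟨b, hb, he⟩
        · exact Or.inl (h.trans h2)
        · exact Or.inr ⟨c, List.mem_cons_self, b, hb, h.trans he⟩
      · exact Or.inr ⟨c', List.mem_cons_of_mem _ hc', b, hb, he⟩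

theorem pv_bases : String.toList "ATCG" = pvAtcg := rfl

theorem pv_helper_eq (seg subs : List Char) :
    findmatchedpos seg subs (-1) = pvBestpos seg subs := by
  obtain ⟨ps, hL, hmem, hall⟩ := pv_findAllCall_spec seg subs []
  rw [List.nil_append] at hL
  simp only [findmatchedpos, pvBestpos, hL, pv_bases]
  by_cases hps : ps = []
  · -- no exact occurrence: A takes the variation branch, B the rfind-of-variations fold
    have hrf : PySem.Chars.rfind seg subs = -1 := by
      rcases pv_rfind_cases seg subs with h | ⟨i, hi, hocc⟩
      · exact h
      · exact absurd (hall i hocc) (by simp [hps])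
    rw [if_pos hps, hrf, if_neg (by norm_num)]
    rw [PySem.List.pyRange_zero_natCast, List.foldl_map]
    obtain ⟨P, hP, hPmem, hPall⟩ := pv_cntFold_spec seg subs (List.range subs.length) []
    rw [List.nil_append] at hP
    rw [show (List.foldl (fun (pl : List Int) (c : Nat) =>
        if ((c : Nat) : Int) ≠ (-1 : Int) then
          pvAtcg.foldl (fun pl base =>
            pvVarLoop seg (PySem.List.slice subs none (some ((c : Nat) : Int)) ++ [base] ++
                PySem.List.slice subs (some (((c : Nat) : Int) + 1)) none) (seg.length + 2)
              (PySem.Chars.find seg (PySem.List.slice subs none (some ((c : Nat) : Int)) ++ [base] ++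
                PySem.List.slice subs (some (((c : Nat) : Int) + 1)) none)) pl) pl
        else pl) [] (List.range subs.length)) = P from hP]
    obtain ⟨n1, n2, n3⟩ := pv_nestedMax_spec
      (fun c b => PySem.Chars.rfind seg (subs.take c ++ [b] ++ subs.drop (c + 1)))
      pvAtcg (List.range subs.length) (-1)
    by_cases hP0 : P = []
    · subst hP0
      have hB : (List.range subs.length).foldl (fun best c => pvAtcg.foldl (fun b x =>
          max b (PySem.Chars.rfind seg (subs.take c ++ [x] ++ subs.drop (c + 1)))) best) (-1) = -1 := by
        rcases n3 with h | ⟨c, hc, b, hb, he⟩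
        · exact h
        · rw [he]
          rcases pv_rfind_cases seg (subs.take c ++ [b] ++ subs.drop (c + 1)) with h2 | ⟨j, hj, hocc⟩
          · exact h2
          · exact absurd (hPall c hc b hb j hocc) (by simp)
      rw [hB]
      rfl
    · obtain ⟨v, hv, hvP, hvmax⟩ := pv_sorted_last_max P hP0
      rw [hv]
      show v = _
      obtain ⟨c, hc, b, hb, i, hvi, hocc⟩ := hPmem v hvP
      apply le_antisymm
      · calc v = (i : Int) := hvi
          _ ≤ PySem.Chars.rfind seg (subs.take c ++ [b] ++ subs.drop (c + 1)) := pv_rfind_ge _ _ _ hocc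
          _ ≤ _ := n2 c hc b hb
      · rcases n3 with h | ⟨c', hc', b', hb', he⟩
        · rw [h]; omega
        · rw [he]
          rcases pv_rfind_cases seg (subs.take c' ++ [b'] ++ subs.drop (c' + 1)) with h2 | ⟨j, hj, hocc'⟩
          · rw [h2]; omega
          · rw [hj]
            have := hPall c' hc' b' hb' j hocc'
            rw [List.nil_append] at this
            exact hvmax _ this
  · -- exact occurrences exist: A returns the largest, B returns rfind
    rw [if_neg hps]
    obtain ⟨v, hv, hvP, hvmax⟩ := pv_sorted_last_max ps hps
    rw [hv]
    show v = _
    obtain ⟨i, hvi, hocc⟩ := hmem v hvP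
    have hge : (i : Int) ≤ PySem.Chars.rfind seg subs := pv_rfind_ge _ _ _ hocc
    rw [if_pos (by omega)]
    apply le_antisymm
    · omega
    · rcases pv_rfind_cases seg subs with h | ⟨j, hj, hocc'⟩
      · omega
      · rw [hj]
        exact hvmax _ (hall j hocc')

theorem pv_scan_eq (m1 m2 : List Char) (ass : List String) : ∀ (n k : Nat), ass.length ≤ k + n →
    pvScanA m1 m2 ass (PySem.List.pyRange (k : Int) (ass.length : Int)) = pvScanB m1 m2 k (ass.drop k) := by
  intro n
  induction n with
  | zero =>
    intro k hk
    have h1 : PySem.List.pyRange (k : Int) (ass.length : Int) = [] :=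
      List.eq_nil_iff_forall_not_mem.mpr (fun x hx => by
        have := PySem.List.mem_pyRange_one.mp hx; omega)
    rw [h1, List.drop_eq_nil_of_le (by omega)]
    rfl
  | succ n ih =>
    intro k hk
    by_cases hlt : k < ass.length
    · rw [PySem.List.pyRange_one_cons (by exact_mod_cast hlt)]
      rw [List.drop_eq_getElem_cons hlt]
      simp only [pvScanA, pvScanB, pvSplitHead]
      rw [PySem.List.pyGetD_natCast, List.getD_eq_getElem ass "" hlt]
      simp only [pv_helper_eq]
      split_ifs with hcond
      · rfl
      · rw [show ((k : Int) + 1) = (((k + 1 : Nat)) : Int) by push_cast; ring]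
        exact ih (k + 1) (by omega)
    · have h1 : PySem.List.pyRange (k : Int) (ass.length : Int) = [] :=
        List.eq_nil_iff_forall_not_mem.mpr (fun x hx => by
          have := PySem.List.mem_pyRange_one.mp hx; omega)
      rw [h1, List.drop_eq_nil_of_le (by omega)]
      rfl

-- ===== VERDICT (by name: the statement is the Claim_ definition above) =====
theorem scanindex_spec : Claim_equal_scanindex := by
  intro mig1line mig2line asslines p_thread _
  unfold Spec_scanindex scanindex scanindex_alt
  exact pv_scan_eq _ _ asslines asslines.length 1 (by omega)
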